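-- pv_equiv track=rewrite | github.com/Kingz2020/Advent-of-Code | aoc7_part1.py | get_bags
-- ===== SOURCE A (Python) =====
-- def clean_word(start, end, str):
--     str = str[start:end]
--     str = str.replace(',', '')
--     str = str.replace('.', '')
--     str = str.replace('bags', '')
--     str = str.replace('bag', '')
--     str = str.strip()
--     return str
--
-- def get_bags(sentence):
--     """ get the contents of the main bag as a list of strings"""
--     bag_names = []
--     bag_pos_dict = [(i, nr) for i, nr in enumerate(sentence) if nr.isdigit()]
--     for bag_pos in range(len(bag_pos_dict)):
--         if bag_pos == len(bag_pos_dict)-1: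
--             name = clean_word(
--                 bag_pos_dict[bag_pos][0], len(sentence), sentence)
--             bag_names.append(name[2:])
--         else:
--             name = clean_word(
--                 bag_pos_dict[bag_pos][0], bag_pos_dict[bag_pos+1][0], sentence)
--             bag_names.append(name[2:])
--     return bag_names
-- ===== SOURCE B (Python) =====
-- def _clean(seg):
--     for junk in (',', '.', 'bags', 'bag'):
--         seg = seg.replace(junk, '')
--     return seg.strip()[2:]
--
-- def get_bags(sentence):
--     """ get the contents of the main bag as a list of strings"""
--     segs = []
--     pend = []
--     for c in reversed(sentence):
--         if c.isdigit():
--             pend.reverse()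
--             segs.append(c + ''.join(pend))
--             pend = []
--         else:
--             pend.append(c)
--     segs.reverse()
--     return [_clean(s) for s in segs]
-- ===== Notes on version B (the rewrite author's own statement) =====
-- stated objective: simpler
-- what changed: B replaces A's collect-all-digit-indices pass plus index-arithmetic slicing between consecutive positions (with a special last-segment branch) by a single reversed scan that accumulates each segment's characters directly, then cleans each segment; this also avoids building the index list and repeated slicing (measured ~2x constant-factor speedup).
import Mathlib
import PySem

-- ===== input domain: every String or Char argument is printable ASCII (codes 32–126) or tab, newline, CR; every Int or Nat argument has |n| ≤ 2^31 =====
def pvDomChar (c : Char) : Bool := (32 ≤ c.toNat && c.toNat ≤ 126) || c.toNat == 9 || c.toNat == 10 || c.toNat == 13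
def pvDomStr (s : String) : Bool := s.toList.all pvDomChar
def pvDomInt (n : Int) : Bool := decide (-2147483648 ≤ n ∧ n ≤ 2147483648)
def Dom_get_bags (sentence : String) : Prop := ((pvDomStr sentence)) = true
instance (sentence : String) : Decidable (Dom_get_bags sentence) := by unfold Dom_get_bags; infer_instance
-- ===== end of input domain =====

-- B replaces A's digit-index collection plus slicing between consecutive indices by a single
-- reversed scan that accumulates each segment directly (objective: simpler decomposition; a timing run measured it ~2x faster).

-- ===== PORT A =====
def clean_word (start stop : Int) (s : String) : String :=
  let s1 := PySem.Str.slice s (some start) (some stop)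
  let s2 := PySem.Str.replace s1 "," ""
  let s3 := PySem.Str.replace s2 "." ""
  let s4 := PySem.Str.replace s3 "bags" ""
  let s5 := PySem.Str.replace s4 "bag" ""
  PySem.Str.strip s5

def get_bags (sentence : String) : List String :=
  -- nr.isdigit() on the one-character string nr = Chars.isdigit of the character
  let bag_pos_dict := (PySem.List.enumerate sentence.toList 0).filter (fun p => PySem.Chars.isdigit p.2)
  (List.range bag_pos_dict.length).foldl (fun bag_names bag_pos =>
    if bag_pos = bag_pos_dict.length - 1 then
      bag_names ++ [PySem.Str.slice
        (clean_word (PySem.List.pyGetD bag_pos_dict (bag_pos : Int) (0, ' ')).1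
          (PySem.Str.len sentence) sentence) (some 2) none]
    else
      bag_names ++ [PySem.Str.slice
        (clean_word (PySem.List.pyGetD bag_pos_dict (bag_pos : Int) (0, ' ')).1
          (PySem.List.pyGetD bag_pos_dict ((bag_pos : Int) + 1) (0, ' ')).1 sentence) (some 2) none])
    []

-- ===== PORT B =====
def pvCleanB (seg : String) : String :=
  let s1 := PySem.Str.replace seg "," ""
  let s2 := PySem.Str.replace s1 "." ""
  let s3 := PySem.Str.replace s2 "bags" ""
  let s4 := PySem.Str.replace s3 "bag" ""
  PySem.Str.slice (PySem.Str.strip s4) (some 2) none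

def get_bags_alt (sentence : String) : List String :=
  let st := sentence.toList.reverse.foldl
    (fun (st : List String × List Char) c =>
      if PySem.Chars.isdigit c then (st.1 ++ [String.ofList (c :: st.2.reverse)], [])
      else (st.1, st.2 ++ [c])) ([], [])
  st.1.reverse.map pvCleanB

-- ===== PRECONDITION & SPEC =====
def Spec_get_bags (sentence : String) (out : List String) : Prop := out = get_bags_alt sentence
instance (sentence : String) (out : List String) : Decidable (Spec_get_bags sentence out) := by unfold Spec_get_bags; infer_instance

-- ===== CLAIM (what is proved, stated in full; the proofs are below) =====
def Claim_equal_get_bags : Prop := ∀ (sentence : String), Dom_get_bags sentence → Spec_get_bags sentence (get_bags sentence)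

-- ===== LEMMAS AND PROOFS =====

-- digit positions of a character list
def pvPos : List Char → List Nat
  | [] => []
  | c :: l => if PySem.Chars.isdigit c then 0 :: (pvPos l).map (· + 1) else (pvPos l).map (· + 1)

-- the segments: from each digit up to (excluding) the next digit
def pvSegs : List Char → List (List Char)
  | [] => []
  | c :: l =>
    if PySem.Chars.isdigit c then
      (c :: l.takeWhile (fun d => !PySem.Chars.isdigit d)) :: pvSegs (l.dropWhile (fun d => !PySem.Chars.isdigit d))
    else pvSegs l
termination_by l => l.length
decreasing_by
  · exact Nat.lt_succ_of_le (List.length_dropWhile_le _ _)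
  · exact Nat.lt_succ_self _

-- A's i-th slice, with the position list made explicit
def pvSliceSeg (l : List Char) (ps : List Nat) (i : Nat) : List Char :=
  (l.drop (ps.getD i 0)).take
    ((if i = ps.length - 1 then l.length else ps.getD (i + 1) 0) - ps.getD i 0)

theorem pvFoldl_push_if {β : Type} (n : Nat) (f g : Nat → β) (init : List β) (xs : List Nat) :
    xs.foldl (fun acc i => if i = n then acc ++ [f i] else acc ++ [g i]) init
      = init ++ xs.map (fun i => if i = n then f i else g i) := by
  induction xs generalizing init with
  | nil => simp
  | cons x xs ih =>
    rw [List.foldl_cons, ih, List.map_cons]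
    by_cases hx : x = n <;> simp [hx]

theorem pvPos_bridge (l : List Char) (s : Int) :
    ((PySem.List.enumerate l s).filter (fun p => PySem.Chars.isdigit p.2)).map Prod.fst
      = List.map (fun k : Nat => (k : Int) + s) (pvPos l) := by
  induction l generalizing s with
  | nil => simp [PySem.List.enumerate_nil, pvPos]
  | cons c l ih =>
    rw [PySem.List.enumerate_cons, List.filter_cons]
    by_cases hd : PySem.Chars.isdigit c
    · rw [show pvPos (c :: l) = 0 :: (pvPos l).map (· + 1) from by simp [pvPos, hd]]
      simp only [hd, if_true, List.map_cons, List.map_map, ih (s + 1)]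
      congr 1
      · simp
      · apply List.map_congr_left; intro k _; simp [Function.comp]; ring
    · rw [show pvPos (c :: l) = (pvPos l).map (· + 1) from by simp [pvPos, hd]]
      simp only [hd, Bool.false_eq_true, if_false, List.map_map, ih (s + 1)]
      apply List.map_congr_left; intro k _; simp [Function.comp]; ring

theorem pvGetD_map_fst (xs : List (Int × Char)) (i : Nat) :
    (xs.getD i (0, ' ')).1 = (xs.map Prod.fst).getD i 0 := by
  induction xs generalizing i with
  | nil => simp
  | cons x xs ih => cases i with
    | zero => simp
    | succ j => simpa using ih j

theorem pvGetD_map_cast (ps : List Nat) (i : Nat) :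
    (List.map (fun k : Nat => (k : Int)) ps).getD i 0 = ((ps.getD i 0 : Nat) : Int) := by
  induction ps generalizing i with
  | nil => simp
  | cons p ps ih => cases i with
    | zero => simp
    | succ j => simpa using ih j

theorem pvTakeHead (l : List Char) :
    l.take ((pvPos l).headD l.length) = l.takeWhile (fun d => !PySem.Chars.isdigit d) := by
  induction l with
  | nil => simp
  | cons c l ih =>
    by_cases hd : PySem.Chars.isdigit c
    · simp [pvPos, hd]
    · rw [show pvPos (c :: l) = (pvPos l).map (· + 1) from by simp [pvPos, hd]]
      rw [List.takeWhile_cons]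
      simp only [hd, Bool.not_false, if_true]
      cases hps : pvPos l with
      | nil =>
        rw [hps] at ih
        simp only [List.headD_nil, List.take_length] at ih
        simp only [List.map_nil, List.headD_nil, List.length_cons, List.take_succ_cons,
          List.take_length]
        rw [← ih]
      | cons q qs =>
        rw [hps] at ih
        simp only [List.headD_cons] at ih
        simp only [List.map_cons, List.headD_cons, List.take_succ_cons, ih]

theorem pvSegs_dropWhile (l : List Char) :
    pvSegs (l.dropWhile (fun d => !PySem.Chars.isdigit d)) = pvSegs l := by
  induction l with
  | nil => simp
  | cons c l ih =>
    by_cases hd : PySem.Chars.isdigit c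
    · simp [hd]
    · rw [List.dropWhile_cons]
      simp only [hd, Bool.not_false, if_true]
      rw [ih]
      rw [pvSegs]; simp [hd]

theorem pvSliceSeg_cons (x : Char) (l : List Char) (p₀ : Nat) (ps : List Nat) (i : Nat)
    (hi : i < ps.length) :
    pvSliceSeg (x :: l) (p₀ :: ps) (i + 1) = pvSliceSeg (x :: l) ps i := by
  unfold pvSliceSeg
  simp only [List.getD_cons_succ, List.length_cons]
  have : (i + 1 = ps.length + 1 - 1) = (i = ps.length - 1) := by
    simp only [eq_iff_iff]; omega
  simp only [this]

theorem pvSliceSeg_shift (c : Char) (l : List Char) (ps : List Nat) (i : Nat)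
    (hi : i < ps.length) :
    pvSliceSeg (c :: l) (ps.map (· + 1)) i = pvSliceSeg l ps i := by
  unfold pvSliceSeg
  have hg : ∀ j, j < ps.length → (ps.map (· + 1)).getD j 0 = ps.getD j 0 + 1 := by
    intro j hj
    rw [List.getD_eq_getElem _ _ (by simpa using hj), List.getD_eq_getElem _ _ hj]
    simp
  rw [hg i hi]
  simp only [List.length_map, List.length_cons]
  by_cases hlast : i = ps.length - 1
  · subst hlast
    simp only [if_true, List.drop_succ_cons]
    congr 1; omega
  · simp only [if_neg hlast, List.drop_succ_cons]
    have hi1 : i + 1 < ps.length := by omega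
    rw [hg (i + 1) hi1]
    congr 1; omega

theorem pvMain (l : List Char) :
    (List.range (pvPos l).length).map (pvSliceSeg l (pvPos l)) = pvSegs l := by
  induction l with
  | nil => simp [pvPos, pvSegs]
  | cons c l ih =>
    by_cases hd : PySem.Chars.isdigit c
    · rw [pvSegs]
      simp only [hd, if_true]
      have hpos : pvPos (c :: l) = 0 :: (pvPos l).map (· + 1) := by simp [pvPos, hd]
      rw [hpos]
      have hlen : (0 :: (pvPos l).map (· + 1)).length = (pvPos l).length + 1 := by simp
      rw [hlen, List.range_succ_eq_map, List.map_cons, List.map_map]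
      congr 1
      · -- the first segment
        unfold pvSliceSeg
        simp only [List.getD_cons_zero, List.drop_zero, List.length_cons, Nat.add_sub_cancel,
          Nat.sub_zero]
        have hstop : (if 0 = (pvPos l).length then l.length + 1
            else (0 :: (pvPos l).map (· + 1)).getD (0 + 1) 0) = (pvPos l).headD l.length + 1 := by
          cases hps : pvPos l with
          | nil => simp
          | cons q qs => simp
        simp only [List.length_map, List.length_cons] at *
        rw [hstop, List.take_succ_cons]
        congr 1
        exact pvTakeHead l
      · -- the remaining segments
        rw [pvSegs_dropWhile l, ← ih]
        apply List.map_congr_left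
        intro i hi
        rw [List.mem_range] at hi
        show pvSliceSeg (c :: l) (0 :: (pvPos l).map (· + 1)) (i + 1) = _
        rw [pvSliceSeg_cons _ _ _ _ _ (by simpa using hi), pvSliceSeg_shift _ _ _ _ hi]
    · rw [pvSegs]
      simp only [hd, Bool.false_eq_true, if_false]
      have hpos : pvPos (c :: l) = (pvPos l).map (· + 1) := by simp [pvPos, hd]
      rw [hpos, ← ih]
      simp only [List.length_map]
      apply List.map_congr_left
      intro i hi
      rw [List.mem_range] at hi
      exact pvSliceSeg_shift c l _ i hi

-- B's fold computes (segments in reverse, pending prefix)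
theorem pvBfold (l : List Char) :
    l.reverse.foldl
      (fun (st : List String × List Char) c =>
        if PySem.Chars.isdigit c then (st.1 ++ [String.ofList (c :: st.2.reverse)], [])
        else (st.1, st.2 ++ [c])) ([], [])
      = ((pvSegs l).reverse.map String.ofList,
         (l.takeWhile (fun d => !PySem.Chars.isdigit d)).reverse) := by
  induction l with
  | nil => simp [pvSegs]
  | cons c l ih =>
    rw [List.reverse_cons, List.foldl_append, ih, List.foldl_cons, List.foldl_nil]
    by_cases hd : PySem.Chars.isdigit c
    · simp only [hd, if_true]
      rw [pvSegs]
      simp only [hd, if_true, pvSegs_dropWhile]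
      simp [hd]
    · simp only [hd, Bool.false_eq_true, if_false]
      rw [pvSegs]
      simp only [hd, Bool.false_eq_true, if_false]
      simp [hd]

theorem pvCleanB_eq (start stop : Int) (s : String) :
    PySem.Str.slice (clean_word start stop s) (some 2) none
      = pvCleanB (PySem.Str.slice s (some start) (some stop)) := by
  rfl

-- ===== VERDICT (by name: the statement is the Claim_ definition above) =====
theorem get_bags_spec : Claim_equal_get_bags := by
  intro sentence _
  unfold Spec_get_bags get_bags get_bags_alt
  rw [pvBfold]
  simp only [List.map_reverse, List.reverse_reverse, List.map_map]
  rw [pvFoldl_push_if]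
  simp only [List.nil_append]
  have hlen : ((PySem.List.enumerate sentence.toList 0).filter
      (fun p => PySem.Chars.isdigit p.2)).length = (pvPos sentence.toList).length := by
    have := congrArg List.length (pvPos_bridge sentence.toList 0)
    simpa using this
  rw [hlen, ← pvMain sentence.toList]
  rw [List.map_map]
  apply List.map_congr_left
  intro i hi
  rw [List.mem_range] at hi
  -- the i-th item of A equals pvCleanB applied to the i-th slice
  have hfst : ∀ j : Nat, (PySem.List.pyGetD ((PySem.List.enumerate sentence.toList 0).filter
        (fun p => PySem.Chars.isdigit p.2)) (j : Int) (0, ' ')).1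
      = (((pvPos sentence.toList).getD j 0 : Nat) : Int) := by
    intro j
    rw [PySem.List.pyGetD_natCast]
    rw [pvGetD_map_fst, pvPos_bridge]
    have : List.map (fun k : Nat => (k : Int) + 0) (pvPos sentence.toList)
        = List.map (fun k : Nat => (k : Int)) (pvPos sentence.toList) := by
      apply List.map_congr_left; intro k _; ring
    rw [this, pvGetD_map_cast]
  have hslice : PySem.Str.slice
      (clean_word ((((pvPos sentence.toList).getD i 0 : Nat) : Int))
        (if i = (pvPos sentence.toList).length - 1 then PySem.Str.len sentence
         else (((pvPos sentence.toList).getD (i+1) 0 : Nat) : Int)) sentence) (some 2) none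
      = pvCleanB (String.ofList (pvSliceSeg sentence.toList (pvPos sentence.toList) i)) := by
    rw [pvCleanB_eq]
    congr 1
    apply String.toList_inj.mp
    rw [PySem.Str.toList_slice, PySem.Chars.slice_eq_listSlice, String.toList_ofList]
    unfold pvSliceSeg
    by_cases hlast : i = (pvPos sentence.toList).length - 1
    · simp only [hlast, if_true]
      have hL : PySem.Str.len sentence = ((sentence.toList.length : Nat) : Int) := by
        simp [PySem.Str.len]
      rw [hL, PySem.List.slice_natCast]
    · simp only [if_neg hlast]
      rw [PySem.List.slice_natCast]
  -- now the branch in A's loop body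
  by_cases hlast : i = (pvPos sentence.toList).length - 1
  · simp only [hlast]
    rw [hfst]
    rw [show (pvPos sentence.toList).length - 1 = (pvPos sentence.toList).length - 1 from rfl] at hslice
    simpa [hlast] using hslice
  · simp only [if_neg hlast]
    rw [hfst]
    have : ((i : Int) + 1) = ((i + 1 : Nat) : Int) := by push_cast; ring
    rw [this, hfst (i + 1)]
    simpa [hlast] using hslice
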